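-- pv_equiv track=rewrite | github.com/jose-ramirez/project_euler | problems/p116.py | f
-- ===== SOURCE A (Python) =====
-- def f(n):
--     l = [0, 0, 1]
--     if n <= 2:
--         return l[n]
--     else:
--         i = 3
--         while i <= n:
--             l.append(l[i - 1] + l[i - 2] + 1)
--             i += 1
--     return l[n]
-- ===== SOURCE B (Python) =====
-- def f(n):
--     # Fibonacci fast doubling: f(n) = fib(n+1) - 1, computed in O(log n).
--     def fib(k):
--         # returns (fib(k), fib(k+1))
--         if k <= 0:
--             return (0, 1)
--         a, b = fib(k >> 1)
--         c = a * (2 * b - a)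
--         d = a * a + b * b
--         return (c, d) if k % 2 == 0 else (d, c + d)
--     return fib(n + 1)[0] - 1
-- ===== Notes on version B (the rewrite author's own statement) =====
-- stated objective: faster
-- what changed: Replaces the O(n) list-building loop for the recurrence l[i]=l[i-1]+l[i-2]+1 (i.e. Fib(n+1)-1) by O(log n) fast-doubling Fibonacci.
-- intended difference: For -3 <= n <= -1 A returns 0, 0, 1 by Python negative-index wraparound into its seed list [0,0,1]; B returns -1 (fib(0)-1, its base case below the recurrence's domain), an equally valid choice on this unspecified corner. — e.g. on f(-1): A returns 1, B returns -1
import Mathlib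
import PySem

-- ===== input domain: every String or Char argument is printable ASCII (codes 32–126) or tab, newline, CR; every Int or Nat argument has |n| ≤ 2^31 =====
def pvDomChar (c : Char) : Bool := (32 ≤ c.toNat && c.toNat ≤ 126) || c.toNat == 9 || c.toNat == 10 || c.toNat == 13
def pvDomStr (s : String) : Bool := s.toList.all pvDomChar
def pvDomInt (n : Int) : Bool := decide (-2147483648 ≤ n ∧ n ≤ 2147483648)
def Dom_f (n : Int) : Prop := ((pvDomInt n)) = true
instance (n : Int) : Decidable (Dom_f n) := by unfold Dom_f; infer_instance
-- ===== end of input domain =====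

-- B replaces A's O(n) list-building loop for l[i]=l[i-1]+l[i-2]+1 (= Fib(n+1)-1)
-- by fast-doubling Fibonacci, O(log n) arithmetic steps.

-- ===== PORT A =====
-- while i <= n: l.append(l[i-1] + l[i-2] + 1); i += 1   (fuel = number of remaining iterations, makes the loop total)
def fLoopA (n : Int) : Nat → Int → List Int → List Int
  | 0, _, l => l
  | fuel+1, i, l =>
    if i ≤ n then
      fLoopA n fuel (i+1) (l ++ [PySem.List.pyGetD l (i-1) 0 + PySem.List.pyGetD l (i-2) 0 + 1])
    else l

def f (n : Int) : Int :=
  let l : List Int := [0, 0, 1]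
  if n ≤ 2 then PySem.List.pyGetD l n 0
  else PySem.List.pyGetD (fLoopA n (n-2).toNat 3 l) n 0

-- ===== PORT B =====
-- fib(k) by fast doubling, returning (fib k, fib (k+1)); fuel makes the k >> 1 recursion structural
def fibPairAux : Nat → Nat → Int × Int
  | 0, _ => (0, 1)
  | _+1, 0 => (0, 1)
  | fuel+1, k+1 =>
    let p := fibPairAux fuel ((k+1)/2)
    let c := p.1 * (2 * p.2 - p.1)
    let d := p.1 * p.1 + p.2 * p.2
    if (k+1) % 2 = 0 then (c, d) else (d, c + d)

def fibPair (k : Nat) : Int × Int := fibPairAux k k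

def f_alt (n : Int) : Int := (fibPair (n+1).toNat).1 - 1

-- ===== PRECONDITION & SPEC =====
-- Pre_ excludes n ≤ -4, where A raises IndexError.
def Pre_f (n : Int) : Prop := -3 ≤ n
instance (n : Int) : Decidable (Pre_f n) := by unfold Pre_f; infer_instance
def pvWitness_f : Int := 5

-- For -3 ≤ n ≤ -1 A returns 0, 0, 1 by Python negative-index wraparound into its seed list [0,0,1];
-- B returns -1 (fib(0)-1, its base case below the recurrence's domain), an equally valid choice on this unspecified corner.
def D_f (n : Int) : Prop := n < 0
instance (n : Int) : Decidable (D_f n) := by unfold D_f; infer_instance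

def Spec_f (n : Int) (out : Int) : Prop := ¬ D_f n → out = f_alt n
instance (n : Int) (out : Int) : Decidable (Spec_f n out) := by unfold Spec_f; infer_instance

def pvDiffWitness_f : Int := -1
def pvDiffWitnessOut_f : Int × Int := (1, -1)

-- ===== CLAIM (what is proved, stated in full; the proofs are below) =====
def Claim_unchanged_f : Prop := ∀ (n : Int), Dom_f n → Pre_f n → Spec_f n (f n)
def Claim_changed_f : Prop := Dom_f (pvDiffWitness_f) ∧ Pre_f (pvDiffWitness_f) ∧ D_f (pvDiffWitness_f) ∧ f (pvDiffWitness_f) = pvDiffWitnessOut_f.1 ∧ f_alt (pvDiffWitness_f) = pvDiffWitnessOut_f.2 ∧ pvDiffWitnessOut_f.1 ≠ pvDiffWitnessOut_f.2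
def Claim_exact_f : Prop := ∀ (n : Int), Dom_f n → Pre_f n → D_f n → f n ≠ f_alt n

-- ===== LEMMAS AND PROOFS =====

-- the common value: G k = fib (k+1) - 1, the k-th value of A's list
def G (k : Nat) : Int := (Nat.fib (k+1) : Int) - 1

lemma fibPairAux_eq (fuel : Nat) : ∀ k : Nat, k ≤ fuel →
    fibPairAux fuel k = ((Nat.fib k : Int), (Nat.fib (k+1) : Int)) := by
  induction fuel with
  | zero =>
    intro k hk
    interval_cases k
    decide
  | succ fuel ih =>
    intro k hk
    match k with
    | 0 => norm_num [fibPairAux]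
    | j+1 =>
      have hp := ih ((j+1)/2) (by omega)
      have hmono : Nat.fib ((j+1)/2) ≤ 2 * Nat.fib ((j+1)/2 + 1) := by
        have := Nat.fib_le_fib_succ (n := (j+1)/2); omega
      by_cases hpar : (j+1) % 2 = 0
      · have h2 : j + 1 = 2 * ((j+1)/2) := by omega
        have hfib1 : Nat.fib (j+1) = Nat.fib ((j+1)/2) * (2 * Nat.fib ((j+1)/2 + 1) - Nat.fib ((j+1)/2)) := by
          conv_lhs => rw [h2]
          rw [Nat.fib_two_mul]
        have hfib2 : Nat.fib (j+1+1) = Nat.fib ((j+1)/2 + 1) ^ 2 + Nat.fib ((j+1)/2) ^ 2 := by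
          have he : j + 1 + 1 = 2 * ((j+1)/2) + 1 := by omega
          conv_lhs => rw [he]
          rw [Nat.fib_two_mul_add_one]
        simp only [fibPairAux, hpar, if_pos]
        rw [hp]
        simp only [Prod.mk.injEq]
        refine ⟨?_, ?_⟩
        · rw [hfib1]; push_cast [Nat.cast_sub hmono]; ring
        · rw [hfib2]; push_cast; ring
      · have h2 : j + 1 = 2 * ((j+1)/2) + 1 := by omega
        have hfib1 : Nat.fib (j+1) = Nat.fib ((j+1)/2 + 1) ^ 2 + Nat.fib ((j+1)/2) ^ 2 := by
          conv_lhs => rw [h2]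
          rw [Nat.fib_two_mul_add_one]
        have hfib2 : Nat.fib (j+1+1) = Nat.fib ((j+1)/2) * (2 * Nat.fib ((j+1)/2 + 1) - Nat.fib ((j+1)/2)) + (Nat.fib ((j+1)/2 + 1) ^ 2 + Nat.fib ((j+1)/2) ^ 2) := by
          have he : j + 1 + 1 = 2 * ((j+1)/2) + 1 + 1 := by omega
          conv_lhs => rw [he]
          rw [Nat.fib_add_two, Nat.fib_two_mul, Nat.fib_two_mul_add_one]
        simp only [fibPairAux, hpar, if_false]
        rw [hp]
        simp only [Prod.mk.injEq]
        refine ⟨?_, ?_⟩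
        · rw [hfib1]; push_cast; ring
        · rw [hfib2]; push_cast [Nat.cast_sub hmono]; ring

lemma f_alt_eq (n : Int) (hn : 0 ≤ n) : f_alt n = G n.toNat := by
  have h1 : (n+1).toNat = n.toNat + 1 := by omega
  simp only [f_alt, fibPair, G, fibPairAux_eq _ _ (le_refl _), h1]

-- A's next appended value is G of the list's length
lemma G_rec (m : Nat) (hm : 2 ≤ m) : G m = G (m-1) + G (m-2) + 1 := by
  obtain ⟨j, rfl⟩ : ∃ j, m = j + 2 := ⟨m - 2, by omega⟩
  simp only [G, Nat.add_sub_cancel, show j + 2 - 1 = j + 1 from by omega]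
  have := Nat.fib_add_two (n := j + 1)
  push_cast [this]; ring

lemma fLoopA_eq (n : Int) : ∀ (fuel : Nat) (i : Int), 3 ≤ i → i + (fuel : Int) = n + 1 →
    fLoopA n fuel i ((List.range i.toNat).map G) = (List.range (n+1).toNat).map G := by
  intro fuel
  induction fuel with
  | zero =>
    intro i h3 hsum
    have : i.toNat = (n+1).toNat := by omega
    simp [fLoopA, this]
  | succ fuel ih =>
    intro i h3 hsum
    have hile : i ≤ n := by omega
    have hlen : ((List.range i.toNat).map G).length = i.toNat := by simp
    have hget1 : PySem.List.pyGetD ((List.range i.toNat).map G) (i-1) 0 = G (i.toNat - 1) := by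
      rw [PySem.List.pyGetD_eq_getElem _ 0 (by omega) (by simp only [List.length_map, List.length_range]; omega)]
      simp only [List.getElem_map, List.getElem_range]
      congr 1; omega
    have hget2 : PySem.List.pyGetD ((List.range i.toNat).map G) (i-2) 0 = G (i.toNat - 2) := by
      rw [PySem.List.pyGetD_eq_getElem _ 0 (by omega) (by simp only [List.length_map, List.length_range]; omega)]
      simp only [List.getElem_map, List.getElem_range]
      congr 1; omega
    have happ : (List.range i.toNat).map G ++ [G (i.toNat - 1) + G (i.toNat - 2) + 1]
        = (List.range (i+1).toNat).map G := by
      have h1 : (i+1).toNat = i.toNat + 1 := by omega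
      rw [h1, List.range_succ, List.map_append, List.map_cons, List.map_nil,
        ← G_rec i.toNat (by omega)]
    simp only [fLoopA, if_pos hile, hget1, hget2, happ]
    exact ih (i+1) (by omega) (by omega)

lemma f_eq_G (n : Int) (hn : 0 ≤ n) : f n = G n.toNat := by
  by_cases h2 : n ≤ 2
  · interval_cases n <;> decide
  · have h3 : 3 ≤ n := by omega
    have hseed : ([0, 0, 1] : List Int) = (List.range ((3 : Int).toNat)).map G := by decide
    have hloop := fLoopA_eq n (n-2).toNat 3 (by omega) (by omega)
    simp only [f, if_neg h2]
    rw [hseed, hloop, PySem.List.pyGetD_eq_getElem _ 0 hn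
      (by simp only [List.length_map, List.length_range]; omega)]
    simp only [List.getElem_map, List.getElem_range]

-- ===== VERDICT (by name: the statement is the Claim_ definition above) =====
theorem f_spec : Claim_unchanged_f := by
  intro n _ _ hD
  have hn : 0 ≤ n := by unfold D_f at hD; omega
  rw [f_eq_G n hn, f_alt_eq n hn]

theorem f_changed : Claim_changed_f := by unfold Claim_changed_f; decide

theorem f_tight : Claim_exact_f := by
  intro n _ hPre hD
  unfold Pre_f at hPre; unfold D_f at hD
  interval_cases n <;> decide
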